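-- pv_equiv track=rewrite | github.com/s267554/AoC2021 | day18/day18.py | find4
-- ===== SOURCE A (Python) =====
-- def find4(sn):
--     par = 0
--     for index, ch in enumerate(sn):
--         if par > 4:
--             return index
--         if ch == '[':
--             par += 1
--         if ch == ']':
--             par -= 1
--     return -1
-- ===== SOURCE B (Python) =====
-- def find4(sn):
--     depths = []
--     par = 0
--     for ch in sn:
--         depths.append(par)
--         if ch == '[':
--             par += 1
--         if ch == ']':
--             par -= 1
--     for i, d in enumerate(depths):
--         if d > 4:
--             return i
--     return -1
-- ===== Notes on version B (the rewrite author's own statement) =====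
-- stated objective: alternative
-- what changed: B splits A's single early-return scan into two phases: it first materialises the list of pre-update bracket depths, then scans that list for the first entry exceeding 4.
import Mathlib
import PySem

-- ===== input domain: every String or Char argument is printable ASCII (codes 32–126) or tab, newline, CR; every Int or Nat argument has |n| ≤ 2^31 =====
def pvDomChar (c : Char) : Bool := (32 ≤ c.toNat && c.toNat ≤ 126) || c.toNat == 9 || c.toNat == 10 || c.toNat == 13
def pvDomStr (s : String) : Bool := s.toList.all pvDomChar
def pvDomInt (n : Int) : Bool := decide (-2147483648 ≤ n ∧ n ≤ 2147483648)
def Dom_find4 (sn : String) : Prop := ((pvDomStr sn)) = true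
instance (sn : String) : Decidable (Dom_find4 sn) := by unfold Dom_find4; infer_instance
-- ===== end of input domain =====

-- B replaces A's single early-return scan by two phases (record pre-update depths, then find the first > 4); same cost, different decomposition.

-- ===== PORT A =====
-- A's loop: at each index check the pre-update depth, then update it for the current char.
def find4Loop (cs : List Char) (index par : Int) : Int :=
  match cs with
  | [] => -1
  | ch :: rest =>
    if par > 4 then index
    else
      let par := if ch = '[' then par + 1 else par
      let par := if ch = ']' then par - 1 else par
      find4Loop rest (index + 1) par

def find4 (sn : String) : Int := find4Loop sn.toList 0 0

-- ===== PORT B =====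
-- Phase 1 of B: the list of pre-update depths (par is appended before being updated for ch).
def depthsOf (cs : List Char) (par : Int) : List Int :=
  match cs with
  | [] => []
  | ch :: rest =>
    let par' := if ch = '[' then par + 1 else par
    let par'' := if ch = ']' then par' - 1 else par'
    par :: depthsOf rest par''

-- Phase 2 of B: first index whose depth exceeds 4, else -1.
def firstOver4 (ds : List Int) (i : Int) : Int :=
  match ds with
  | [] => -1
  | d :: rest => if d > 4 then i else firstOver4 rest (i + 1)

def find4_alt (sn : String) : Int := firstOver4 (depthsOf sn.toList 0) 0

-- ===== PRECONDITION & SPEC =====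
def Spec_find4 (sn : String) (out : Int) : Prop := out = find4_alt sn
instance (sn : String) (out : Int) : Decidable (Spec_find4 sn out) := by unfold Spec_find4; infer_instance

-- ===== CLAIM (what is proved, stated in full; the proofs are below) =====
def Claim_equal_find4 : Prop := ∀ (sn : String), Dom_find4 sn → Spec_find4 sn (find4 sn)

-- ===== LEMMAS AND PROOFS =====
theorem find4Loop_eq (cs : List Char) (index par : Int) :
    find4Loop cs index par = firstOver4 (depthsOf cs par) index := by
  induction cs generalizing index par with
  | nil => rfl
  | cons ch rest ih =>
    simp only [find4Loop, depthsOf, firstOver4]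
    by_cases h : par > 4
    · simp [h]
    · simp [h, ih]

-- ===== VERDICT (by name: the statement is the Claim_ definition above) =====
theorem find4_spec : Claim_equal_find4 := by
  intro sn _
  unfold Spec_find4 find4 find4_alt
  exact find4Loop_eq sn.toList 0 0
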